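-- pv_equiv track=rewrite | github.com/cirosantilli/project-euler-solvers | solvers/282.py | _tower_geq
-- ===== SOURCE A (Python) =====
-- def _tower_geq(h: int, limit: int) -> bool:
--     """Return True iff 2^^h >= limit, without constructing huge integers."""
--     if limit <= 1:
--         return True
--     v = 2
--     if h == 1:
--         return v >= limit
--
--     # Quickly cap growth: once v is even moderately large, 2**v dwarfs any limit
--     # relevant to our moduli.
--     for _ in range(2, h + 1):
--         if v >= 60:
--             return True
--         v = 2**v
--         if v >= limit:
--             return True
--     return v >= limit
-- ===== SOURCE B (Python) =====
-- def _tower_geq(h: int, limit: int) -> bool: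
--     """Return True iff 2^^h >= limit (with A's >=60 cap quirk), via a closed-form table."""
--     if limit <= 1 or h >= 5:
--         return True
--     return [2, 4, 16, 65536][max(h, 1) - 1] >= limit
-- ===== Notes on version B (the rewrite author's own statement) =====
-- stated objective: simpler
-- what changed: Replaces the squaring loop with a closed-form lookup: the tower takes only the values 2,4,16,65536 before A's >=60 cap makes the answer always True (h>=5), so B returns True for limit<=1 or h>=5 and otherwise compares the tabulated tower value to limit.
import Mathlib
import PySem

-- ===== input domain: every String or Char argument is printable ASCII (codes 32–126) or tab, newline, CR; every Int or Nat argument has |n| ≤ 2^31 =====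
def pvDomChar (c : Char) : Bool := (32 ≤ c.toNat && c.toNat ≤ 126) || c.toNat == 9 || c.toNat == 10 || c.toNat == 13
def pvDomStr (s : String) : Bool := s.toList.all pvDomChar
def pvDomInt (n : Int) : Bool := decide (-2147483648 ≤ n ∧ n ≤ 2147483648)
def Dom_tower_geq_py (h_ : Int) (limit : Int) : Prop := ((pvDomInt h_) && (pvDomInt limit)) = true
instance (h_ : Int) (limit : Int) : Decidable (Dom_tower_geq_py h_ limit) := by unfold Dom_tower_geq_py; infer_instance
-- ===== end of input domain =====

-- B replaces A's repeated-squaring loop with a closed-form table lookup (simpler).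

-- ===== PORT A =====
-- the for-loop over range(2, h+1): fuel = max(0, h-1) = (h_-1).toNat iterations over state v;
-- 2**v is ported as 2 ^ v.toNat (v is 2, 4, 16 or 65536 at every evaluation, never negative).
def towerLoopA : Nat → Int → Int → Bool
  | 0, v, limit => decide (v ≥ limit)
  | n+1, v, limit =>
      if v ≥ 60 then true
      else
        let v' : Int := 2 ^ v.toNat
        if v' ≥ limit then true else towerLoopA n v' limit

def tower_geq_py (h_ : Int) (limit : Int) : Bool :=
  if limit ≤ 1 then true
  else if h_ = 1 then decide ((2 : Int) ≥ limit)
  else towerLoopA (h_ - 1).toNat 2 limit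

-- ===== PORT B =====
-- literal port of Source B; [..][max(h,1)-1] via pyGet? (index is always in 0..3 here), getD 0 unreachable
def tower_geq_py_alt (h_ : Int) (limit : Int) : Bool :=
  if limit ≤ 1 ∨ h_ ≥ 5 then true
  else decide (((PySem.List.pyGet? ([2, 4, 16, 65536] : List Int) (max h_ 1 - 1)).getD 0) ≥ limit)

-- ===== PRECONDITION & SPEC =====
def Spec_tower_geq_py (h_ : Int) (limit : Int) (out : Bool) : Prop := out = tower_geq_py_alt h_ limit
instance (h_ : Int) (limit : Int) (out : Bool) : Decidable (Spec_tower_geq_py h_ limit out) := by unfold Spec_tower_geq_py; infer_instance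

-- ===== CLAIM (what is proved, stated in full; the proofs are below) =====
def Claim_equal_tower_geq_py : Prop := ∀ (h_ : Int) (limit : Int), Dom_tower_geq_py h_ limit → Spec_tower_geq_py h_ limit (tower_geq_py h_ limit)

-- ===== LEMMAS AND PROOFS =====
lemma towerLoopA_cap (n : Nat) (limit : Int) : towerLoopA (n + 4) 2 limit = true := by
  simp only [towerLoopA]
  norm_num
  have h : (60:Int) ≤ 2 ^ (((2:Int) ^ (((2:Int) ^ (Int.toNat 2)).toNat)).toNat) := by decide
  tauto

-- ===== VERDICT (by name: the statement is the Claim_ definition above) =====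
theorem tower_geq_py_spec : Claim_equal_tower_geq_py := by
  intro h_ limit _dom
  unfold Spec_tower_geq_py tower_geq_py tower_geq_py_alt
  by_cases hl : limit ≤ 1
  · simp [hl]
  · by_cases h5 : h_ ≥ 5
    · obtain ⟨k, hk⟩ : ∃ k : Nat, (h_ - 1).toNat = k + 4 := ⟨(h_ - 1).toNat - 4, by omega⟩
      have h1 : h_ ≠ 1 := by omega
      simp [hl, h1, h5, hk, towerLoopA_cap]
    · by_cases h1 : h_ = 1
      · subst h1
        simp [hl, h5, PySem.List.pyGet?, PySem.List.pyIdx?]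
      · by_cases h0 : h_ ≤ 0
        · have hz : (h_ - 1).toNat = 0 := by omega
          have hm : max h_ 1 = 1 := by omega
          simp [hl, h1, h5, hz, hm, towerLoopA, PySem.List.pyGet?, PySem.List.pyIdx?]
        · have hlo : (2:Int) ≤ h_ := by omega
          have hhi : h_ < 5 := by omega
          interval_cases h_
          · simp [hl, towerLoopA, PySem.List.pyGet?, PySem.List.pyIdx?]
          · simp [hl, towerLoopA, PySem.List.pyGet?, PySem.List.pyIdx?]
            omega
          · simp [hl, towerLoopA, PySem.List.pyGet?, PySem.List.pyIdx?]
            by_cases hc : limit ≤ 65536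
            · simp [hc]
            · simp [show ¬limit ≤ (4:Int) by omega, show ¬limit ≤ (16:Int) by omega, hc]
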